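-- pv_equiv track=rewrite | github.com/AnhTtis/GemMinner | Board.py | handle_line
-- ===== SOURCE A (Python) =====
-- def handle_line(get_line: str) -> list[str]:
--     tokens = []
--     token = ""
--     length = len(get_line)
--     for get_token in get_line:
--         length -= 1
--         if get_token == ',' or length == 0:
--             if get_token == get_line[-1] and get_line[-1] <= '9' and get_line[-1] >= '0':
--                 token += get_line[-1]
--             tokens.append(token)
--             token = ""
--
--         if get_token <= '9' and get_token >= '0':
--             token += get_token
--
--     return tokens
-- ===== SOURCE B (Python) =====
-- def handle_line(get_line: str) -> list[str]:
--     if not get_line: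
--         return []
--     parts = get_line.split(',')
--     if get_line.endswith(','):
--         parts.pop()
--     return [''.join(ch for ch in part if '0' <= ch <= '9') for part in parts]
-- ===== Notes on version B (the rewrite author's own statement) =====
-- stated objective: simpler
-- what changed: Replaced the char-by-char state machine (manual token accumulator, countdown length, and a last-character patch-up inside the loop) with a split-on-comma, drop-trailing-empty-segment, then filter-digits-per-segment decomposition.
import Mathlib
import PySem

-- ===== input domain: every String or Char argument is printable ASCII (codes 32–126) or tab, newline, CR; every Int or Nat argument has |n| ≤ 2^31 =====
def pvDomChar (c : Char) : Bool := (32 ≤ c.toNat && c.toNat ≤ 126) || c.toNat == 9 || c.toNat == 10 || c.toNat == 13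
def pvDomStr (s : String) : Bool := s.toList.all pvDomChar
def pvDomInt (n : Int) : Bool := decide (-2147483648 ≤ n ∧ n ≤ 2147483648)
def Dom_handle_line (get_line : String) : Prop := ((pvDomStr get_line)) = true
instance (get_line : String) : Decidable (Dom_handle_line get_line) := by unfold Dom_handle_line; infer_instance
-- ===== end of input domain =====

-- B replaces A's char-by-char state machine with split-on-comma / drop trailing empty segment / keep digits per segment (simpler decomposition, same cost).

-- ===== PORT A =====
-- Literal transliteration: tokens/token/length state, loop over the characters; strings are
-- handled on the List Char side (token : List Char, appended as String.mk), get_line[-1] is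
-- PySem.List.pyGet? l (-1) (the 'none' arm is unreachable: the loop body only runs when l ≠ []).
def pvStepA (l : List Char) (st : List String × List Char × Int) (get_token : Char) :
    List String × List Char × Int :=
  let tokens := st.1
  let token := st.2.1
  let length := st.2.2 - 1
  let (tokens, token) :=
    if get_token = ',' ∨ length = 0 then
      let token :=
        match PySem.List.pyGet? l (-1) with
        | some lastc =>
            if get_token = lastc ∧ lastc ≤ '9' ∧ '0' ≤ lastc then token ++ [lastc] else token
        | none => token
      (tokens ++ [String.mk token], ([] : List Char))
    else (tokens, token)
  let token := if get_token ≤ '9' ∧ '0' ≤ get_token then token ++ [get_token] else token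
  (tokens, token, length)

def handle_line (get_line : String) : List String :=
  let l := get_line.toList
  (l.foldl (pvStepA l) ([], [], (PySem.Str.len get_line : Int))).1

-- ===== PORT B =====
-- get_line.split(',') is ported as List.splitOn ',' on the characters (single-character
-- separator: exact Python semantics); parts.pop() is dropLast.
def handle_line_alt (get_line : String) : List String :=
  if get_line = "" then []
  else
    let parts := get_line.toList.splitOn ','
    let parts := if PySem.Str.endswith get_line "," then parts.dropLast else parts
    parts.map (fun p => String.mk (p.filter (fun ch => decide ('0' ≤ ch) && decide (ch ≤ '9'))))

-- ===== PRECONDITION & SPEC =====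
def Spec_handle_line (get_line : String) (out : List String) : Prop := out = handle_line_alt get_line
instance (get_line : String) (out : List String) : Decidable (Spec_handle_line get_line out) := by unfold Spec_handle_line; infer_instance

-- ===== CLAIM (what is proved, stated in full; the proofs are below) =====
def Claim_equal_handle_line : Prop := ∀ (get_line : String), Dom_handle_line get_line → Spec_handle_line get_line (handle_line get_line)

-- ===== LEMMAS AND PROOFS =====

/-- The digit filter of B, as a named function. -/
def pvDig (c : Char) : Bool := decide ('0' ≤ c) && decide (c ≤ '9')

lemma pvDig_iff (c : Char) : pvDig c = true ↔ (c ≤ '9' ∧ '0' ≤ c) := by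
  simp [pvDig, and_comm]

lemma pvGetLast_cons (c : Char) (l : List Char) (h : l ≠ []) :
    (c :: l).getLast? = l.getLast? := by
  rcases l with _ | ⟨x, xs⟩
  · exact absurd rfl h
  · exact List.getLast?_cons_cons ..

/-- Reference recursion capturing A's loop (token = current partial token, over remaining chars). -/
def pvG (token : List Char) : List Char → List String
  | [] => []
  | c :: rest =>
      if c = ',' ∨ rest = [] then
        String.mk (if rest = [] ∧ pvDig c then token ++ [c] else token) :: pvG [] rest
      else pvG (if pvDig c then token ++ [c] else token) rest

lemma pvPyGet_neg_one (l : List Char) (h : l ≠ []) :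
    PySem.List.pyGet? l (-1) = l.getLast? := by
  conv_lhs => rw [← List.dropLast_append_getLast h]
  rw [PySem.List.pyGet?_neg_one_append_singleton, List.getLast?_eq_getLast_of_ne_nil h]

lemma pvFold_eq_pvG (l : List Char) :
    ∀ (rest : List Char) (tokens : List String) (token : List Char),
      rest <:+ l →
      (rest.foldl (pvStepA l) (tokens, token, (rest.length : Int))).1 = tokens ++ pvG token rest := by
  intro rest
  induction rest with
  | nil => intro tokens token _; simp [pvG]
  | cons c rest ih =>
    intro tokens token hsuf
    have hrest : rest <:+ l := (List.suffix_cons c rest).trans hsuf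
    have hl : l ≠ [] := by
      rcases hsuf with ⟨p, hp⟩; intro h; rw [h] at hp
      exact List.cons_ne_nil _ _ (List.append_eq_nil_iff.mp hp).2
    rw [List.foldl_cons]
    rcases Decidable.em (rest = []) with hre | hre
    · -- last character: c is l's last element
      subst hre
      have hlast : l.getLast? = some c := by
        rcases hsuf with ⟨p, hp⟩
        rw [← hp, List.getLast?_append]; rfl
      have hget : PySem.List.pyGet? l (-1) = some c := by
        rw [pvPyGet_neg_one l hl, hlast]
      rcases Decidable.em (c ≤ '9' ∧ '0' ≤ c) with hd | hd
      · have hdig : pvDig c = true := (pvDig_iff c).mpr hd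
        have hstep : pvStepA l (tokens, token, (([c] : List Char).length : Int)) c
            = (tokens ++ [String.mk (token ++ [c])], [c], 0) := by
          simp [pvStepA, hget, hd]
        rw [hstep]
        simp [pvG, hdig]
      · have hdig : pvDig c = false := Bool.eq_false_iff.mpr (fun h => hd ((pvDig_iff c).mp h))
        have hstep : pvStepA l (tokens, token, (([c] : List Char).length : Int)) c
            = (tokens ++ [String.mk token], [], 0) := by
          have : ¬ (c = c ∧ c ≤ '9' ∧ '0' ≤ c) := by rintro ⟨-, h⟩; exact hd h
          simp [pvStepA, hget, hd]
        rw [hstep]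
        simp [pvG, hdig]
    · -- middle character
      have hlen0 : ¬ (((c :: rest).length : Int) - 1 = 0) := by
        have : rest.length ≠ 0 := by simpa [List.length_eq_zero_iff] using hre
        simp; omega
      have hlen : ((c :: rest).length : Int) - 1 = (rest.length : Int) := by simp
      rcases Decidable.em (c = ',') with hc | hc
      · subst hc
        rcases hsome : PySem.List.pyGet? l (-1) with _ | lastc
        · rw [pvPyGet_neg_one l hl] at hsome
          simp [List.getLast?_eq_none_iff, hl] at hsome
        · have hnoadd : ¬ ((',' : Char) = lastc ∧ lastc ≤ '9' ∧ '0' ≤ lastc) := by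
            rintro ⟨rfl, -, h0⟩; exact absurd h0 (by decide)
          have hnd : ¬ ((',' : Char) ≤ '9' ∧ '0' ≤ (',' : Char)) := by decide
          have hstep : pvStepA l (tokens, token, (((',' :: rest) : List Char).length : Int)) ','
              = (tokens ++ [String.mk token], [], (rest.length : Int)) := by
            simp [pvStepA, hsome, hnoadd]
          rw [hstep, ih (tokens ++ [String.mk token]) [] hrest]
          simp [pvG, hre]
      · have hcond : ¬ (c = ',' ∨ ((c :: rest).length : Int) - 1 = 0) := by
          rintro (h | h); exact hc h; exact hlen0 h
        have hG : pvG token (c :: rest) = pvG (if pvDig c then token ++ [c] else token) rest := by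
          simp [pvG, hre, hc]
        have hne0 : ¬ ((rest.length : Int) = 0) := by
          simp only [Int.natCast_eq_zero, List.length_eq_zero_iff]; exact hre
        rcases Decidable.em (c ≤ '9' ∧ '0' ≤ c) with hd | hd
        · have hdig : pvDig c = true := (pvDig_iff c).mpr hd
          have hstep : pvStepA l (tokens, token, (((c :: rest) : List Char).length : Int)) c
              = (tokens, token ++ [c], (rest.length : Int)) := by
            simp [pvStepA, hc, hre, hd]
          rw [hstep, ih tokens (token ++ [c]) hrest, hG, hdig, if_pos rfl]
        · have hdig : ¬ pvDig c = true := fun h => hd ((pvDig_iff c).mp h)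
          have hstep : pvStepA l (tokens, token, (((c :: rest) : List Char).length : Int)) c
              = (tokens, token, (rest.length : Int)) := by
            simp [pvStepA, hc, hre, hd]
          rw [hstep, ih tokens token hrest, hG, if_neg hdig]

lemma pvSplit_ne_nil (l : List Char) : l.splitOn ',' ≠ [] := by
  simpa [List.splitOn] using List.splitOnP_ne_nil (· == ',') l

lemma pvSplit_two_le (l : List Char) (h : l.getLast? = some ',') :
    2 ≤ (l.splitOn ',').length := by
  induction l with
  | nil => simp at h
  | cons c rest ih =>
    rcases Decidable.em (rest = []) with hre | hre
    · subst hre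
      simp at h; subst h
      decide
    · rw [pvGetLast_cons c rest hre] at h
      have h2 := ih h
      rcases Decidable.em (c = ',') with hc | hc
      · subst hc
        have h2' : 2 ≤ (List.splitOnP (fun x => x == ',') rest).length := by
          simpa [List.splitOn] using h2
        simp [List.splitOn, List.splitOnP_cons]
        omega
      · simp only [List.splitOn, List.splitOnP_cons, beq_iff_eq, if_neg hc] at h2 ⊢
        rcases hsp : List.splitOnP (fun x => x == ',') rest with _ | ⟨x, xs⟩
        · exact absurd hsp (List.splitOnP_ne_nil _ _)
        · rw [hsp] at h2; simpa using h2

/-- The value of the reference recursion, as B computes it. -/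
lemma pvG_eq_split (l : List Char) (hne : l ≠ []) :
    ∀ token : List Char,
      pvG token l =
        (String.mk (token ++ ((if l.getLast? = some ',' then (l.splitOn ',').dropLast
            else l.splitOn ',').headI.filter pvDig))) ::
          ((if l.getLast? = some ',' then (l.splitOn ',').dropLast
            else l.splitOn ',').tail.map (fun p => String.mk (p.filter pvDig))) := by
  induction l with
  | nil => exact absurd rfl hne
  | cons c rest ih =>
    intro token
    rcases Decidable.em (rest = []) with hre | hre
    · subst hre
      rcases Decidable.em (c = ',') with hc | hc
      · subst hc
        simp [pvG, List.splitOn, List.splitOnP_cons, List.splitOnP_nil, pvDig]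
      · have hd : ¬ ((c :: []).getLast? = some ',') := by
          simp; intro h; exact hc h
        rw [if_neg hd]
        have hsp : ([c] : List Char).splitOn ',' = [[c]] := by
          simp [List.splitOn, List.splitOnP_cons, List.splitOnP_nil, hc]
        rw [hsp]
        simp only [pvG, List.headI, List.tail, List.map, List.filter]
        cases h : pvDig c <;> simp
    · have hlast : (c :: rest).getLast? = rest.getLast? := pvGetLast_cons c rest hre
      have hPne : rest.splitOn ',' ≠ [] := pvSplit_ne_nil rest
      -- the conditionally-trimmed parts of rest are nonempty
      have hP'ne : (if rest.getLast? = some ',' then (rest.splitOn ',').dropLast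
          else rest.splitOn ',') ≠ [] := by
        split_ifs with h
        · have h2 := pvSplit_two_le rest h
          intro hnil
          have h3 : ((rest.splitOn ',').dropLast).length = (rest.splitOn ',').length - 1 :=
            List.length_dropLast
          rw [hnil] at h3
          simp at h3
          omega
        · exact hPne
      rcases Decidable.em (c = ',') with hc | hc
      · subst hc
        have hG : pvG token (',' :: rest) = String.mk token :: pvG [] rest := by
          simp [pvG, hre]
        rw [hG, ih hre []]
        have hsp : (',' :: rest).splitOn ',' = [] :: rest.splitOn ',' := by
          simp [List.splitOn, List.splitOnP_cons]
        rw [hsp, hlast]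
        split_ifs with h
        · have h2 := pvSplit_two_le rest h
          have hdrop : ([] :: rest.splitOn ',').dropLast = [] :: (rest.splitOn ',').dropLast := by
            rcases hq : rest.splitOn ',' with _ | ⟨x, xs⟩
            · exact absurd hq hPne
            · simp
          rw [hdrop]
          have hP'ne' : (rest.splitOn ',').dropLast ≠ [] := by
            simpa [h] using hP'ne
          rcases hq : (rest.splitOn ',').dropLast with _ | ⟨x, xs⟩
          · exact absurd hq hP'ne'
          · simp
        · rcases hq : rest.splitOn ',' with _ | ⟨x, xs⟩
          · exact absurd hq hPne
          · simp
      · have hG : pvG token (c :: rest) = pvG (if pvDig c then token ++ [c] else token) rest := by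
          simp [pvG, hre, hc]
        rw [hG]
        have hsp : (c :: rest).splitOn ',' = (rest.splitOn ',').modifyHead (c :: ·) := by
          simp [List.splitOn, List.splitOnP_cons, hc]
        rw [hsp, hlast]
        rcases Decidable.em (rest.getLast? = some ',') with h | h
        · have h2 := pvSplit_two_le rest h
          have hmod : ((rest.splitOn ',').modifyHead (c :: ·)).dropLast
              = ((rest.splitOn ',').dropLast).modifyHead (c :: ·) := by
            rcases hq : rest.splitOn ',' with _ | ⟨x, xs⟩
            · exact absurd hq hPne
            · rcases hxs : xs with _ | ⟨y, ys⟩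
              · rw [hq, hxs] at h2; simp at h2
              · simp
          rw [if_pos h, hmod, ih hre (if pvDig c then token ++ [c] else token), if_pos h]
          have hP'ne' : (rest.splitOn ',').dropLast ≠ [] := by simpa [h] using hP'ne
          rcases hq : (rest.splitOn ',').dropLast with _ | ⟨x, xs⟩
          · exact absurd hq hP'ne'
          · simp [List.filter]
            rcases Decidable.em (pvDig c = true) with hdg | hdg <;> simp [hdg]
        · rw [if_neg h, ih hre (if pvDig c then token ++ [c] else token), if_neg h]
          rcases hq : rest.splitOn ',' with _ | ⟨x, xs⟩
          · exact absurd hq hPne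
          · simp [List.filter]
            rcases Decidable.em (pvDig c = true) with hdg | hdg <;> simp [hdg]

lemma pvEndswith_iff (s : String) :
    PySem.Str.endswith s "," = true ↔ s.toList.getLast? = some ',' := by
  rw [PySem.Str.endswith_eq, PySem.Chars.endswith_iff, List.getLast?_eq_some_iff]
  have hcomma : (",".toList) = [','] := rfl
  rw [hcomma]
  constructor
  · rintro ⟨p, hp⟩; exact ⟨p, hp.symm⟩
  · rintro ⟨p, hp⟩; exact ⟨p, hp.symm⟩

-- ===== VERDICT (by name: the statement is the Claim_ definition above) =====
theorem handle_line_spec : Claim_equal_handle_line := by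
  intro s _
  unfold Spec_handle_line handle_line handle_line_alt
  rcases Decidable.em (s = "") with h0 | h0
  · subst h0; simp
  · have hl : s.toList ≠ [] := fun h => h0 (String.toList_inj.mp h)
    have hlen : (PySem.Str.len s : Int) = (s.toList.length : Int) := by
      simp [PySem.Str.len_eq]
    simp only [if_neg h0, hlen]
    rw [pvFold_eq_pvG s.toList s.toList [] [] (List.suffix_refl _)]
    rw [pvG_eq_split s.toList hl []]
    have hiff : (PySem.Str.endswith s "," = true) ↔ (s.toList.getLast? = some ',') :=
      pvEndswith_iff s
    rcases Decidable.em (PySem.Str.endswith s "," = true) with he | he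
    · have hlast := hiff.mp he
      rw [if_pos hlast, if_pos he]
      have hP'ne : (s.toList.splitOn ',').dropLast ≠ [] := by
        have h2 := pvSplit_two_le s.toList hlast
        intro hnil
        have h3 : ((s.toList.splitOn ',').dropLast).length = (s.toList.splitOn ',').length - 1 :=
          List.length_dropLast
        rw [hnil] at h3; simp at h3; omega
      have hpd : (fun ch => decide ('0' ≤ ch) && decide (ch ≤ '9')) = pvDig := rfl
      rcases hq : (s.toList.splitOn ',').dropLast with _ | ⟨x, xs⟩
      · exact absurd hq hP'ne
      · simp [hpd]
    · have hlast : ¬ (s.toList.getLast? = some ',') := fun h => he (hiff.mpr h)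
      rw [if_neg hlast, if_neg he]
      have hpd : (fun ch => decide ('0' ≤ ch) && decide (ch ≤ '9')) = pvDig := rfl
      rcases hq : s.toList.splitOn ',' with _ | ⟨x, xs⟩
      · exact absurd hq (pvSplit_ne_nil s.toList)
      · simp [hpd]
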